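-- pv_equiv track=rewrite | github.com/marchiesa/proof-lifting | smt_analysis/categorization.py | _find_statement_semicolon
-- ===== SOURCE A (Python) =====
-- def _find_statement_semicolon(line: str, start_col: int) -> int | None:
--     """Find the first statement-ending semicolon after start_col.
--
--     Ignores semicolons inside strings, chars, line comments, and block comments.
--     """
--     in_string = False
--     in_char = False
--     in_block_comment = False
--     escape = False
--     i = start_col
--
--     while i < len(line):
--         ch = line[i]
--         nxt = line[i + 1] if i + 1 < len(line) else ""
--
--         if in_block_comment:
--             if ch == "*" and nxt == "/":
--                 in_block_comment = False
--                 i += 2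
--                 continue
--             i += 1
--             continue
--
--         if in_string:
--             if escape:
--                 escape = False
--             elif ch == "\\":
--                 escape = True
--             elif ch == '"':
--                 in_string = False
--             i += 1
--             continue
--
--         if in_char:
--             if escape:
--                 escape = False
--             elif ch == "\\":
--                 escape = True
--             elif ch == "'":
--                 in_char = False
--             i += 1
--             continue
--
--         if ch == "/" and nxt == "/":
--             return None
--         if ch == "/" and nxt == "*":
--             in_block_comment = True
--             i += 2
--             continue
--         if ch == '"':
--             in_string = True
--             i += 1
--             continue
--         if ch == "'":
--             in_char = True
--             i += 1
--             continue
--         if ch == ";":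
--             return i
--         i += 1
--
--     return None
-- ===== SOURCE B (Python) =====
-- def _find_statement_semicolon(line: str, start_col: int) -> int | None:
--     """Find the first statement-ending semicolon after start_col.
--
--     Token-skipping scanner: instead of one loop over per-character state
--     flags, the outer loop only looks at code characters and delegates a
--     whole string/char literal or block comment to a skip helper that
--     returns the index just past it.
--     """
--     n = len(line)
--
--     def skip_quoted(i: int, quote: str) -> int:
--         # i is just past the opening quote; returns index just past the
--         # closing quote (an escaped character is consumed in one step).
--         while i < n:
--             c = line[i]
--             if c == "\\":
--                 i += 2
--             elif c == quote:
--                 return i + 1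
--             else:
--                 i += 1
--         return i
--
--     def skip_block(i: int) -> int:
--         # i is just past "/*"; returns index just past the closing "*/".
--         while i < n and not (line[i] == "*" and i + 1 < n and line[i + 1] == "/"):
--             i += 1
--         return i + 2 if i < n else i
--
--     i = start_col
--     while i < n:
--         c = line[i]
--         if c == ";":
--             return i
--         if c == '"':
--             i = skip_quoted(i + 1, '"')
--         elif c == "'":
--             i = skip_quoted(i + 1, "'")
--         elif c == "/" and i + 1 < n and line[i + 1] == "/":
--             return None
--         elif c == "/" and i + 1 < n and line[i + 1] == "*":
--             i = skip_block(i + 2)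
--         else:
--             i += 1
--     return None
-- ===== Notes on version B (the rewrite author's own statement) =====
-- stated objective: alternative
-- what changed: Replaced A's single character loop over four boolean state flags (in_string, in_char, in_block_comment, escape) by a token-skipping scanner: an outer loop over code characters that delegates each whole string/char literal or block comment to a dedicated skip helper returning the index just past it.
import Mathlib
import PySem

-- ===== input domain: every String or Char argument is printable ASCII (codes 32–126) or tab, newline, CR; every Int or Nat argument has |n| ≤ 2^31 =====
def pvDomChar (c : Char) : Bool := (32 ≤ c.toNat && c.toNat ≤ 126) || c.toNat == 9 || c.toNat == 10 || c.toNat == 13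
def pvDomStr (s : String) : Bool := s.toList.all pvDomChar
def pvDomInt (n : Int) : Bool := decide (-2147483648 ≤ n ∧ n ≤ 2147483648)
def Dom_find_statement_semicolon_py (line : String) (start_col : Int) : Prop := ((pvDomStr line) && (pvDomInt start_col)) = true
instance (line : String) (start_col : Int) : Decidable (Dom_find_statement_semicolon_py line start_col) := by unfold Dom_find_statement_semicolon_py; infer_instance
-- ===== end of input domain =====

-- B replaces A's one loop over four per-character state flags by a token-skipping
-- scanner: an outer loop over code characters that delegates each whole string/char
-- literal or block comment to a skip helper returning the index just past it
-- (objective: alternative decomposition; same O(n), a timing run measured a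
-- constant-factor speedup from the tighter skip loops).
-- Both loops are ported as structural recursion on a fuel that starts at
-- (len(line) - start_col).toNat; each iteration advances i by ≥ 1 and consumes
-- exactly 1 fuel, so fuel ≥ len - i throughout and fuel 0 implies i ≥ len,
-- where the loop's exit value is returned — the fuel never cuts a run short.

-- ===== PORT A =====
-- A's while-loop with state (in_string, in_char, in_block_comment, escape).
-- `PySem.List.pyGet? line i = none` is Python's IndexError (only reachable when
-- start_col < -len(line), which Pre_ excludes); the port returns none there.
def pvA_loop (line : List Char) (fuel : Nat) (i : Int)
    (inString inChar inBlock escape : Bool) : Option Int :=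
  match fuel with
  | 0 => none   -- only reachable with i ≥ len(line): the loop's exit value
  | fuel + 1 =>
    if i < (line.length : Int) then
      match PySem.List.pyGet? line i with
      | none => none   -- IndexError; unreachable under Pre_
      | some ch =>
        let nxt : Option Char :=
          if i + 1 < (line.length : Int) then PySem.List.pyGet? line (i + 1) else none
        if inBlock then
          if ch = '*' ∧ nxt = some '/' then
            pvA_loop line fuel (i + 2) inString inChar false escape
          else pvA_loop line fuel (i + 1) inString inChar inBlock escape
        else if inString then
          if escape then pvA_loop line fuel (i + 1) inString inChar inBlock false
          else if ch = '\\' then pvA_loop line fuel (i + 1) inString inChar inBlock true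
          else if ch = '"' then pvA_loop line fuel (i + 1) false inChar inBlock escape
          else pvA_loop line fuel (i + 1) inString inChar inBlock escape
        else if inChar then
          if escape then pvA_loop line fuel (i + 1) inString inChar inBlock false
          else if ch = '\\' then pvA_loop line fuel (i + 1) inString inChar inBlock true
          else if ch = '\'' then pvA_loop line fuel (i + 1) inString false inBlock escape
          else pvA_loop line fuel (i + 1) inString inChar inBlock escape
        else if ch = '/' ∧ nxt = some '/' then none
        else if ch = '/' ∧ nxt = some '*' then
          pvA_loop line fuel (i + 2) inString inChar true escape
        else if ch = '"' then pvA_loop line fuel (i + 1) true inChar inBlock escape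
        else if ch = '\'' then pvA_loop line fuel (i + 1) inString true inBlock escape
        else if ch = ';' then some i
        else pvA_loop line fuel (i + 1) inString inChar inBlock escape
    else none

def find_statement_semicolon_py (line : String) (start_col : Int) : Option Int :=
  pvA_loop line.toList ((line.toList.length : Int) - start_col).toNat start_col
    false false false false

-- ===== PORT B =====
-- Source B's skip_quoted: i is just past the opening quote; returns the index just
-- past the closing quote (or ≥ len when the literal is unterminated).
def pvB_skipQuoted (line : List Char) (fuel : Nat) (i : Int) (quote : Char) : Int :=
  match fuel with
  | 0 => i   -- only reachable with i ≥ len(line): the loop's exit value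
  | fuel + 1 =>
    if i < (line.length : Int) then
      match PySem.List.pyGet? line i with
      | none => i   -- IndexError; unreachable under Pre_
      | some c =>
        if c = '\\' then pvB_skipQuoted line fuel (i + 2) quote
        else if c = quote then i + 1
        else pvB_skipQuoted line fuel (i + 1) quote
    else i

-- Source B's skip_block: i is just past "/*"; returns the index just past "*/".
def pvB_skipBlock (line : List Char) (fuel : Nat) (i : Int) : Int :=
  match fuel with
  | 0 => i   -- only reachable with i ≥ len(line): the loop's exit value
  | fuel + 1 =>
    if i < (line.length : Int) then
      if PySem.List.pyGet? line i = some '*' ∧ i + 1 < (line.length : Int) ∧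
          PySem.List.pyGet? line (i + 1) = some '/' then i + 2
      else pvB_skipBlock line fuel (i + 1)
    else i

-- Source B's outer loop over code characters.
def pvB_outer (line : List Char) (fuel : Nat) (i : Int) : Option Int :=
  match fuel with
  | 0 => none   -- only reachable with i ≥ len(line): the loop's exit value
  | fuel + 1 =>
    if i < (line.length : Int) then
      match PySem.List.pyGet? line i with
      | none => none   -- IndexError; unreachable under Pre_
      | some c =>
        if c = ';' then some i
        else if c = '"' then pvB_outer line fuel (pvB_skipQuoted line fuel (i + 1) '"')
        else if c = '\'' then pvB_outer line fuel (pvB_skipQuoted line fuel (i + 1) '\'')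
        else if c = '/' ∧ i + 1 < (line.length : Int) ∧
            PySem.List.pyGet? line (i + 1) = some '/' then none
        else if c = '/' ∧ i + 1 < (line.length : Int) ∧
            PySem.List.pyGet? line (i + 1) = some '*' then
          pvB_outer line fuel (pvB_skipBlock line fuel (i + 2))
        else pvB_outer line fuel (i + 1)
    else none

def find_statement_semicolon_py_alt (line : String) (start_col : Int) : Option Int :=
  pvB_outer line.toList ((line.toList.length : Int) - start_col).toNat start_col

-- ===== PRECONDITION & SPEC =====
-- Pre_ excludes exactly start_col < -len(line), where both A and B raise
-- IndexError on the first subscript line[start_col].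
def Pre_find_statement_semicolon_py (line : String) (start_col : Int) : Prop :=
  -(PySem.Str.len line) ≤ start_col
instance (line : String) (start_col : Int) : Decidable (Pre_find_statement_semicolon_py line start_col) := by unfold Pre_find_statement_semicolon_py; infer_instance

def pvWitness_find_statement_semicolon_py : String × Int := ("a;", 0)

def Spec_find_statement_semicolon_py (line : String) (start_col : Int) (out : Option Int) : Prop := out = find_statement_semicolon_py_alt line start_col
instance (line : String) (start_col : Int) (out : Option Int) : Decidable (Spec_find_statement_semicolon_py line start_col out) := by unfold Spec_find_statement_semicolon_py; infer_instance

-- ===== CLAIM (what is proved, stated in full; the proofs are below) =====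
def Claim_equal_find_statement_semicolon_py : Prop := ∀ (line : String) (start_col : Int), Dom_find_statement_semicolon_py line start_col → Pre_find_statement_semicolon_py line start_col → Spec_find_statement_semicolon_py line start_col (find_statement_semicolon_py line start_col)

-- ===== LEMMAS AND PROOFS =====

-- Under Pre_, every subscript the loops perform is in range.
theorem pvGet_some (cs : List Char) (i : Int) (h1 : -(cs.length : Int) ≤ i)
    (h2 : i < (cs.length : Int)) : ∃ c, PySem.List.pyGet? cs i = some c := by
  cases h : PySem.List.pyGet? cs i with
  | some c => exact ⟨c, rfl⟩
  | none => rw [PySem.List.pyGet?_eq_none_iff] at h; exact absurd ⟨h1, h2⟩ h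

-- exit values once the index has left the line, at any fuel
theorem pvA_exit (cs : List Char) (f : Nat) (i : Int) (s c b e : Bool)
    (hn : ¬ i < (cs.length : Int)) : pvA_loop cs f i s c b e = none := by
  cases f <;> simp [pvA_loop, hn]

theorem pvB_outer_exit (cs : List Char) (f : Nat) (i : Int)
    (hn : ¬ i < (cs.length : Int)) : pvB_outer cs f i = none := by
  cases f <;> simp [pvB_outer, hn]

theorem pvB_skipQuoted_exit (cs : List Char) (f : Nat) (i : Int) (q : Char)
    (hn : ¬ i < (cs.length : Int)) : pvB_skipQuoted cs f i q = i := by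
  cases f <;> simp [pvB_skipQuoted, hn]

theorem pvB_skipBlock_exit (cs : List Char) (f : Nat) (i : Int)
    (hn : ¬ i < (cs.length : Int)) : pvB_skipBlock cs f i = i := by
  cases f <;> simp [pvB_skipBlock, hn]

-- the skip helpers never move backwards
theorem pvB_skipQuoted_ge (cs : List Char) (f : Nat) :
    ∀ i q, i ≤ pvB_skipQuoted cs f i q := by
  induction f with
  | zero => intro i q; simp [pvB_skipQuoted]
  | succ f ih =>
    intro i q
    rw [pvB_skipQuoted]
    by_cases hn : i < (cs.length : Int)
    · simp only [hn, if_true]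
      cases hget : PySem.List.pyGet? cs i with
      | none => exact le_refl i
      | some c =>
        have h2 := ih (i + 2) q
        have h1 := ih (i + 1) q
        dsimp only
        split_ifs <;> omega
    · simp [hn]

theorem pvB_skipBlock_ge (cs : List Char) (f : Nat) :
    ∀ i, i ≤ pvB_skipBlock cs f i := by
  induction f with
  | zero => intro i; simp [pvB_skipBlock]
  | succ f ih =>
    intro i
    rw [pvB_skipBlock]
    by_cases hn : i < (cs.length : Int)
    · have h1 := ih (i + 1)
      simp only [hn, if_true]
      split_ifs <;> omega
    · simp [hn]

-- A's loop computes the same value at any two sufficient fuels.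
theorem pvA_fuel (cs : List Char) :
    ∀ f1 f2 : Nat, ∀ (i : Int) (s c b e : Bool),
      ((cs.length : Int) - i).toNat ≤ f1 → ((cs.length : Int) - i).toNat ≤ f2 →
      pvA_loop cs f1 i s c b e = pvA_loop cs f2 i s c b e := by
  intro f1
  induction f1 using Nat.strong_induction_on with
  | _ f1 ih =>
    intro f2 i s c b e h1 h2
    by_cases hn : i < (cs.length : Int)
    · obtain ⟨f1', rfl⟩ : ∃ k, f1 = k + 1 := ⟨f1 - 1, by omega⟩
      obtain ⟨f2', rfl⟩ : ∃ k, f2 = k + 1 := ⟨f2 - 1, by omega⟩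
      rw [pvA_loop, pvA_loop]
      simp only [hn, if_true]
      cases hget : PySem.List.pyGet? cs i with
      | none => rfl
      | some ch =>
        dsimp only
        split_ifs <;>
          first
            | rfl
            | (apply ih f1' (by omega) f2' <;> omega)
    · rw [pvA_exit cs _ _ _ _ _ _ hn, pvA_exit cs _ _ _ _ _ _ hn]

-- A in string state at i (escape clear) = A back in code state at skip_quoted i '"'.
theorem pvA_string (cs : List Char) :
    ∀ fa : Nat, ∀ (i : Int) (fs fb : Nat),
      ((cs.length : Int) - i).toNat ≤ fa → ((cs.length : Int) - i).toNat ≤ fs →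
      -(cs.length : Int) ≤ i →
      ((cs.length : Int) - pvB_skipQuoted cs fs i '"').toNat ≤ fb →
      pvA_loop cs fa i true false false false =
        pvA_loop cs fb (pvB_skipQuoted cs fs i '"') false false false false := by
  intro fa
  induction fa using Nat.strong_induction_on with
  | _ fa ih =>
    intro i fs fb hfa hfs hi hfb
    by_cases hn : i < (cs.length : Int)
    · obtain ⟨fa', rfl⟩ : ∃ k, fa = k + 1 := ⟨fa - 1, by omega⟩
      obtain ⟨fs', rfl⟩ : ∃ k, fs = k + 1 := ⟨fs - 1, by omega⟩
      obtain ⟨ch, hch⟩ := pvGet_some cs i hi hn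
      rw [pvA_loop]
      conv_rhs => rw [pvB_skipQuoted]
      by_cases hesc : ch = '\\'
      · -- backslash: A sets escape and consumes the next char; B jumps two
        subst hesc
        simp [hn, hch]
        by_cases hn2 : i + 1 < (cs.length : Int)
        · obtain ⟨fa'', rfl⟩ : ∃ k, fa' = k + 1 := ⟨fa' - 1, by omega⟩
          obtain ⟨ch2, hch2⟩ := pvGet_some cs (i + 1) (by omega) hn2
          rw [pvA_loop]
          simp [hn2, hch2]
          rw [show i + 1 + 1 = i + 2 from by ring]
          exact ih fa'' (by omega) (i + 2) fs' fb (by omega) (by omega) (by omega)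
            (by simpa [pvB_skipQuoted, hn, hch] using hfb)
        · rw [pvA_exit cs fa' (i + 1) _ _ _ _ hn2,
            pvB_skipQuoted_exit cs fs' (i + 2) _ (by omega),
            pvA_exit cs fb (i + 2) _ _ _ _ (by omega)]
      · by_cases hclose : ch = '"'
        · -- closing quote: both return to code state at i + 1
          subst hclose
          simp [hn, hch]
          exact pvA_fuel cs fa' fb (i + 1) _ _ _ _ (by omega)
            (by simpa [pvB_skipQuoted, hn, hch] using hfb)
        · -- ordinary character inside the literal: both advance by one
          simp [hn, hch, hesc, hclose]
          exact ih fa' (by omega) (i + 1) fs' fb (by omega) (by omega) (by omega)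
            (by simpa [pvB_skipQuoted, hn, hch, hesc, hclose] using hfb)
    · rw [pvA_exit cs fa i _ _ _ _ hn, pvB_skipQuoted_exit cs fs i _ hn,
        pvA_exit cs fb i _ _ _ _ hn]

-- A in char-literal state at i (escape clear) = A back in code state at skip_quoted i "'".
theorem pvA_char (cs : List Char) :
    ∀ fa : Nat, ∀ (i : Int) (fs fb : Nat),
      ((cs.length : Int) - i).toNat ≤ fa → ((cs.length : Int) - i).toNat ≤ fs →
      -(cs.length : Int) ≤ i →
      ((cs.length : Int) - pvB_skipQuoted cs fs i '\'').toNat ≤ fb →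
      pvA_loop cs fa i false true false false =
        pvA_loop cs fb (pvB_skipQuoted cs fs i '\'') false false false false := by
  intro fa
  induction fa using Nat.strong_induction_on with
  | _ fa ih =>
    intro i fs fb hfa hfs hi hfb
    by_cases hn : i < (cs.length : Int)
    · obtain ⟨fa', rfl⟩ : ∃ k, fa = k + 1 := ⟨fa - 1, by omega⟩
      obtain ⟨fs', rfl⟩ : ∃ k, fs = k + 1 := ⟨fs - 1, by omega⟩
      obtain ⟨ch, hch⟩ := pvGet_some cs i hi hn
      rw [pvA_loop]
      conv_rhs => rw [pvB_skipQuoted]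
      by_cases hesc : ch = '\\'
      · -- backslash: A sets escape and consumes the next char; B jumps two
        subst hesc
        simp [hn, hch]
        by_cases hn2 : i + 1 < (cs.length : Int)
        · obtain ⟨fa'', rfl⟩ : ∃ k, fa' = k + 1 := ⟨fa' - 1, by omega⟩
          obtain ⟨ch2, hch2⟩ := pvGet_some cs (i + 1) (by omega) hn2
          rw [pvA_loop]
          simp [hn2, hch2]
          rw [show i + 1 + 1 = i + 2 from by ring]
          exact ih fa'' (by omega) (i + 2) fs' fb (by omega) (by omega) (by omega)
            (by simpa [pvB_skipQuoted, hn, hch] using hfb)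
        · rw [pvA_exit cs fa' (i + 1) _ _ _ _ hn2,
            pvB_skipQuoted_exit cs fs' (i + 2) _ (by omega),
            pvA_exit cs fb (i + 2) _ _ _ _ (by omega)]
      · by_cases hclose : ch = '\''
        · -- closing quote: both return to code state at i + 1
          subst hclose
          simp [hn, hch]
          exact pvA_fuel cs fa' fb (i + 1) _ _ _ _ (by omega)
            (by simpa [pvB_skipQuoted, hn, hch] using hfb)
        · -- ordinary character inside the literal: both advance by one
          simp [hn, hch, hesc, hclose]
          exact ih fa' (by omega) (i + 1) fs' fb (by omega) (by omega) (by omega)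
            (by simpa [pvB_skipQuoted, hn, hch, hesc, hclose] using hfb)
    · rw [pvA_exit cs fa i _ _ _ _ hn, pvB_skipQuoted_exit cs fs i _ hn,
        pvA_exit cs fb i _ _ _ _ hn]

-- A in block-comment state at i = A back in code state at skip_block i.
theorem pvA_block (cs : List Char) :
    ∀ fa : Nat, ∀ (i : Int) (fs fb : Nat),
      ((cs.length : Int) - i).toNat ≤ fa → ((cs.length : Int) - i).toNat ≤ fs →
      -(cs.length : Int) ≤ i →
      ((cs.length : Int) - pvB_skipBlock cs fs i).toNat ≤ fb →
      pvA_loop cs fa i false false true false =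
        pvA_loop cs fb (pvB_skipBlock cs fs i) false false false false := by
  intro fa
  induction fa using Nat.strong_induction_on with
  | _ fa ih =>
    intro i fs fb hfa hfs hi hfb
    by_cases hn : i < (cs.length : Int)
    · obtain ⟨fa', rfl⟩ : ∃ k, fa = k + 1 := ⟨fa - 1, by omega⟩
      obtain ⟨fs', rfl⟩ : ∃ k, fs = k + 1 := ⟨fs - 1, by omega⟩
      obtain ⟨ch, hch⟩ := pvGet_some cs i hi hn
      rw [pvA_loop]
      conv_rhs => rw [pvB_skipBlock]
      by_cases hstar : ch = '*' ∧ i + 1 < (cs.length : Int) ∧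
          PySem.List.pyGet? cs (i + 1) = some '/'
      · -- closing "*/": both resume in code state at i + 2
        obtain ⟨h1, h2, h3⟩ := hstar; subst h1
        simp [hn, hch, h2, h3]
        exact pvA_fuel cs fa' fb (i + 2) _ _ _ _ (by omega)
          (by simpa [pvB_skipBlock, hn, hch, h2, h3] using hfb)
      · -- not the closing delimiter: both advance by one
        have hA : ¬ (ch = '*' ∧ (if i + 1 < (cs.length : Int) then
            PySem.List.pyGet? cs (i + 1) else none) = some '/') := by
          rintro ⟨ha, hb⟩
          by_cases hc : i + 1 < (cs.length : Int)
          · rw [if_pos hc] at hb; exact hstar ⟨ha, hc, hb⟩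
          · rw [if_neg hc] at hb; simp at hb
        simp [hn, hch, hstar]
        exact ih fa' (by omega) (i + 1) fs' fb (by omega) (by omega) (by omega)
          (by simpa [pvB_skipBlock, hn, hch, hstar] using hfb)
    · rw [pvA_exit cs fa i _ _ _ _ hn, pvB_skipBlock_exit cs fs i hn,
        pvA_exit cs fb i _ _ _ _ hn]

-- Main simulation at a shared fuel: A's loop in code state = B's outer loop.
theorem pvA_main (cs : List Char) :
    ∀ f : Nat, ∀ i : Int, ((cs.length : Int) - i).toNat ≤ f → -(cs.length : Int) ≤ i →
      pvA_loop cs f i false false false false = pvB_outer cs f i := by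
  intro f
  induction f with
  | zero =>
    intro i hf hi
    have hn : ¬ i < (cs.length : Int) := by omega
    rw [pvA_exit cs 0 i _ _ _ _ hn, pvB_outer_exit cs 0 i hn]
  | succ f ih =>
    intro i hf hi
    by_cases hn : i < (cs.length : Int)
    · obtain ⟨ch, hch⟩ := pvGet_some cs i hi hn
      rw [pvA_loop, pvB_outer]
      have hmeas : ((cs.length : Int) - (i + 1)).toNat ≤ f := by omega
      by_cases hsemi : ch = ';'
      · subst hsemi; simp [hn, hch]
      by_cases hdq : ch = '"'
      · -- opening string literal
        subst hdq
        have hj := pvB_skipQuoted_ge cs f (i + 1) '"'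
        simp [hn, hch]
        rw [pvA_string cs f (i + 1) f f hmeas hmeas (by omega) (by omega)]
        exact ih (pvB_skipQuoted cs f (i + 1) '"') (by omega) (by omega)
      by_cases hsq : ch = '\''
      · -- opening char literal
        subst hsq
        have hj := pvB_skipQuoted_ge cs f (i + 1) '\''
        simp [hn, hch]
        rw [pvA_char cs f (i + 1) f f hmeas hmeas (by omega) (by omega)]
        exact ih (pvB_skipQuoted cs f (i + 1) '\'') (by omega) (by omega)
      by_cases hsl : ch = '/'
      · -- possible comment opener: case on the next character
        subst hsl
        by_cases hn2 : i + 1 < (cs.length : Int)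
        · obtain ⟨ch2, hch2⟩ := pvGet_some cs (i + 1) (by omega) hn2
          by_cases hc2 : ch2 = '/'
          · subst hc2; simp [hn, hch, hn2, hch2]
          by_cases hc3 : ch2 = '*'
          · -- block comment: A switches state, B calls skip_block
            subst hc3
            have hj := pvB_skipBlock_ge cs f (i + 2)
            simp [hn, hch, hn2, hch2, hc2]
            rw [pvA_block cs f (i + 2) f f (by omega) (by omega) (by omega) (by omega)]
            exact ih (pvB_skipBlock cs f (i + 2)) (by omega) (by omega)
          · simp [hn, hch, hn2, hch2, hc2, hc3, hsemi, hdq, hsq]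
            exact ih (i + 1) hmeas (by omega)
        · simp [hn, hch, hn2, hsemi, hdq, hsq]
          exact ih (i + 1) hmeas (by omega)
      · -- ordinary code character
        have h1 : ¬ (ch = '/' ∧ (if i + 1 < (cs.length : Int) then
            PySem.List.pyGet? cs (i + 1) else none) = some '/') := fun h => hsl h.1
        have h2 : ¬ (ch = '/' ∧ (if i + 1 < (cs.length : Int) then
            PySem.List.pyGet? cs (i + 1) else none) = some '*') := fun h => hsl h.1
        have h3 : ¬ (ch = '/' ∧ i + 1 < (cs.length : Int) ∧
            PySem.List.pyGet? cs (i + 1) = some '/') := fun h => hsl h.1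
        have h4 : ¬ (ch = '/' ∧ i + 1 < (cs.length : Int) ∧
            PySem.List.pyGet? cs (i + 1) = some '*') := fun h => hsl h.1
        simp [hn, hch, h3, h4, hdq, hsq, hsemi]
        exact ih (i + 1) hmeas (by omega)
    · rw [pvA_exit cs _ i _ _ _ _ hn, pvB_outer_exit cs _ i hn]

-- ===== VERDICT (by name: the statement is the Claim_ definition above) =====
theorem find_statement_semicolon_py_spec : Claim_equal_find_statement_semicolon_py := by
  intro line start_col _hdom hpre
  unfold Spec_find_statement_semicolon_py find_statement_semicolon_py
    find_statement_semicolon_py_alt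
  rw [Pre_find_statement_semicolon_py, PySem.Str.len_eq] at hpre
  exact pvA_main line.toList ((line.toList.length : Int) - start_col).toNat
    start_col (le_refl _) hpre
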